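-- pv_equiv track=rewrite | github.com/IrreverentHydra/DevOps_TestTask | src/generate_versions.py | generate_versions
-- ===== SOURCE A (Python) =====
-- import itertools
--
-- def generate_versions(template):
--     """Генерирует версии на основе шаблона"""
--     parts = template.split(".")
--     versions = []
--     for part in parts:
--         if part == '*':
--             versions.append(['1', '9'])
--         else:
--             versions.append([part])
--     return [".".join(version) for version in itertools.product(*versions)]
-- ===== SOURCE B (Python) =====
-- def generate_versions(template):
--     """Recursively branch on the first '*' part, substituting '1'/'9' in place."""
--     return ['.'.join(p) for p in _expand(template.split('.'))]
--
-- def _expand(parts):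
--     try:
--         i = parts.index('*')
--     except ValueError:
--         return [parts]
--     return [q for v in ('1', '9') for q in _expand(parts[:i] + [v] + parts[i+1:])]
-- ===== Notes on version B (the rewrite author's own statement) =====
-- stated objective: alternative
-- what changed: Replaces the option-list construction plus itertools.product with a recursive expansion that finds the first '*' part, substitutes '1' and '9' in place and recurses until no wildcard remains.
import Mathlib
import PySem

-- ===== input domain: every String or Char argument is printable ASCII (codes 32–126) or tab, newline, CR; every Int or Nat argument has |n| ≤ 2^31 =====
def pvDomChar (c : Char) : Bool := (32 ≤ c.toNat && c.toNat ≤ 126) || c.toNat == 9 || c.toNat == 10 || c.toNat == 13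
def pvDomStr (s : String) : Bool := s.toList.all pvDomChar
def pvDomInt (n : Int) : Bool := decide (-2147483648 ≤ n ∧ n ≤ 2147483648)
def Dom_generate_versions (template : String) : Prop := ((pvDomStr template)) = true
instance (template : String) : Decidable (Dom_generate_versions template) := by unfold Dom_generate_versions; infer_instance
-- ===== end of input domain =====

-- B replaces option lists + itertools.product with recursion on the first '*' part,
-- substituting '1'/'9' in place (objective: alternative, same cost).

-- ===== PORT A =====
-- itertools.product(*versions): leftmost factor varies slowest
def pvProdAll (xss : List (List String)) : List (List String) :=
  match xss with
  | [] => [[]]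
  | xs :: rest => xs.flatMap (fun x => (pvProdAll rest).map (fun v => x :: v))

def generate_versions (template : String) : List String :=
  let parts := (PySem.Str.split? template ".").getD []
  let versions := parts.foldl (fun acc part =>
    acc ++ [if part == "*" then ["1", "9"] else [part]]) []
  (pvProdAll versions).map (fun v => PySem.Str.join "." v)

-- ===== PORT B =====
-- _expand: find the first '*' (ValueError branch = none), substitute '1'/'9', recurse
def pvExpand (parts : List String) : List (List String) :=
  match h : PySem.List.index? parts "*" with
  | none => [parts]
  | some i =>
      -- '.attach' only carries v ∈ ["1","9"] into the termination proof
      (["1", "9"] : List String).attach.flatMap (fun v =>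
        pvExpand (PySem.List.slice parts none (some (i : Int)) ++ [v.1] ++
                  PySem.List.slice parts (some ((i : Int) + 1)) none))
termination_by parts.count "*"
decreasing_by
  obtain ⟨pre, suf, hps, hlen, hnot⟩ := (PySem.List.index?_eq_some_iff _ _ _).mp h
  subst hps hlen
  have hv : v.1 ≠ "*" := by
    rcases List.mem_pair.mp v.2 with h' | h' <;> simp [h']
  rw [PySem.List.slice_to_natCast, show ((pre.length : Int) + 1) = ((pre.length + 1 : Nat) : Int) by push_cast; ring,
      PySem.List.slice_from_natCast]
  simp [List.count_append, List.count_eq_zero.mpr hnot, hv]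

def generate_versions_alt (template : String) : List String :=
  (pvExpand ((PySem.Str.split? template ".").getD [])).map (fun p => PySem.Str.join "." p)

-- ===== PRECONDITION & SPEC =====
def Spec_generate_versions (template : String) (out : List String) : Prop := out = generate_versions_alt template
instance (template : String) (out : List String) : Decidable (Spec_generate_versions template out) := by unfold Spec_generate_versions; infer_instance

-- ===== CLAIM (what is proved, stated in full; the proofs are below) =====
def Claim_equal_generate_versions : Prop := ∀ (template : String), Dom_generate_versions template → Spec_generate_versions template (generate_versions template)

-- ===== LEMMAS AND PROOFS =====

theorem pv_foldl_append_map (ps : List String) (acc : List (List String)) :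
    ps.foldl (fun a p => a ++ [if p == "*" then ["1", "9"] else [p]]) acc
      = acc ++ ps.map (fun p => if p == "*" then ["1", "9"] else [p]) := by
  induction ps generalizing acc with
  | nil => simp
  | cons p rest ih => rw [List.foldl_cons, ih]; simp

-- pvProdAll over a singleton-only prefix just prepends that prefix to every tuple
theorem pv_prod_singletons (a : List String) (ha : "*" ∉ a) (xss : List (List String)) :
    pvProdAll (a.map (fun p => if p == "*" then ["1", "9"] else [p]) ++ xss)
      = (pvProdAll xss).map (fun v => a ++ v) := by
  induction a with
  | nil => simp
  | cons x rest ih =>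
      have hx : (x == "*") = false := by
        simp only [List.mem_cons, not_or] at ha
        rw [beq_eq_false_iff_ne]
        exact fun h' => ha.1 h'.symm
      simp only [List.map_cons, hx, List.cons_append, pvProdAll,
        ih (by intro hm; exact ha (List.mem_cons_of_mem _ hm))]
      simp [List.map_map, Function.comp_def]

theorem pvExpand_eq : ∀ (n : ℕ) (parts : List String), parts.count "*" = n →
    pvExpand parts = pvProdAll (parts.map (fun p => if p == "*" then ["1", "9"] else [p])) := by
  intro n
  induction n using Nat.strong_induction_on with
  | _ n ih =>
    intro parts hn
    rw [pvExpand.eq_def]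
    split
    next h =>
        have hnm : "*" ∉ parts := (PySem.List.index?_eq_none_iff _ _).mp h
        have h2 := pv_prod_singletons parts hnm []
        simp [pvProdAll] at h2 ⊢
        exact h2.symm
    next i h =>
        obtain ⟨pre, suf, hps, hlen, hnot⟩ := (PySem.List.index?_eq_some_iff _ _ _).mp h
        subst hps hlen
        have hsuf : suf.count "*" < n := by
          rw [← hn]
          simp [List.count_append, List.count_eq_zero.mpr hnot]
        rw [PySem.List.slice_to_natCast, show ((pre.length : Int) + 1) = ((pre.length + 1 : Nat) : Int) by push_cast; ring,
            PySem.List.slice_from_natCast]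
        have hdrop : List.drop (pre.length + 1) (pre ++ "*" :: suf) = suf := by
          rw [show pre ++ "*" :: suf = (pre ++ ["*"]) ++ suf by simp, List.drop_left' (by simp)]
        simp only [List.take_left, hdrop]
        have key : ∀ v : String, v ≠ "*" →
            pvExpand (pre ++ [v] ++ suf)
              = (pvProdAll (suf.map (fun p => if p == "*" then ["1", "9"] else [p]))).map
                  (fun t => pre ++ v :: t) := by
          intro v hv
          rw [ih (suf.count "*") hsuf (pre ++ [v] ++ suf)
                (by simp [List.count_append, List.count_eq_zero.mpr hnot, hv])]
          have hpre : "*" ∉ pre ++ [v] := by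
            intro hm
            rcases List.mem_append.mp hm with h' | h'
            · exact hnot h'
            · exact hv (List.mem_singleton.mp h').symm
          rw [List.map_append, pv_prod_singletons (pre ++ [v]) hpre]
          simp [List.append_assoc]
        have hif : (if (("*" : String) == "*") = true then (["1", "9"] : List String) else ["*"]) = ["1", "9"] := rfl
        rw [List.map_append, List.map_cons, hif]
        simp only [List.flatMap_subtype, List.unattach_attach]
        rw [pv_prod_singletons pre hnot (["1", "9"] :: suf.map (fun p => if p == "*" then ["1", "9"] else [p]))]
        simp only [pvProdAll]
        simp only [List.flatMap_cons, List.flatMap_nil, List.append_nil, List.map_append,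
          List.map_map, Function.comp_def]
        rw [key "1" (by decide), key "9" (by decide)]

-- ===== VERDICT (by name: the statement is the Claim_ definition above) =====
theorem generate_versions_spec : Claim_equal_generate_versions := by
  intro template _
  show (pvProdAll (((PySem.Str.split? template ".").getD []).foldl
      (fun acc part => acc ++ [if part == "*" then ["1", "9"] else [part]]) [])).map
      (fun v => PySem.Str.join "." v) = generate_versions_alt template
  rw [pv_foldl_append_map]
  unfold generate_versions_alt
  rw [pvExpand_eq (((PySem.Str.split? template ".").getD []).count "*") _ rfl]
  simp
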